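-- pv_equiv track=rewrite | github.com/pypi-data/pypi-mirror-293 | packages/Report-Ranger/report_ranger-3.1-py3-none-any.whl/report_ranger/table.py | convert_list_of_dicts_to_matrix
-- ===== SOURCE A (Python) =====
-- def convert_list_of_dicts_to_matrix(table):
--     tableheadings = []
--
--     # Get the headings from the dicts
--     for row in table:
--         for h in row.keys():
--             if h not in tableheadings:
--                 tableheadings.append(h)
--
--     newtable = []
--
--     # Headings will always be the first row of the new table
--     newtable.append(tableheadings)
--     for row in table:
--         newrow = []
--         for h in tableheadings:
--             if h in row.keys():
--                 newrow.append(row[h])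
--             else:
--                 # This heading isn't in this row, add a blank
--                 newrow.append("")
--         newtable.append(newrow)
--     return newtable
-- ===== SOURCE B (Python) =====
-- def convert_list_of_dicts_to_matrix(table):
--     # Ordered unique headings, then scatter each row's items into a blank row by column index.
--     tableheadings = list(dict.fromkeys(k for row in table for k in row))
--     index = {h: i for i, h in enumerate(tableheadings)}
--     newtable = [tableheadings]
--     for row in table:
--         newrow = [""] * len(tableheadings)
--         for k, v in row.items():
--             newrow[index[k]] = v
--         newtable.append(newrow)
--     return newtable
-- ===== Notes on version B (the rewrite author's own statement) =====
-- stated objective: faster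
-- what changed: The per-row gather loop (for each heading, membership-test and look up the row) is replaced by a scatter: headings are deduplicated in one pass with dict.fromkeys, a heading-to-column index dict is built once, and each output row starts as [""]*n and is filled by iterating only the row's own items.
import Mathlib
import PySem

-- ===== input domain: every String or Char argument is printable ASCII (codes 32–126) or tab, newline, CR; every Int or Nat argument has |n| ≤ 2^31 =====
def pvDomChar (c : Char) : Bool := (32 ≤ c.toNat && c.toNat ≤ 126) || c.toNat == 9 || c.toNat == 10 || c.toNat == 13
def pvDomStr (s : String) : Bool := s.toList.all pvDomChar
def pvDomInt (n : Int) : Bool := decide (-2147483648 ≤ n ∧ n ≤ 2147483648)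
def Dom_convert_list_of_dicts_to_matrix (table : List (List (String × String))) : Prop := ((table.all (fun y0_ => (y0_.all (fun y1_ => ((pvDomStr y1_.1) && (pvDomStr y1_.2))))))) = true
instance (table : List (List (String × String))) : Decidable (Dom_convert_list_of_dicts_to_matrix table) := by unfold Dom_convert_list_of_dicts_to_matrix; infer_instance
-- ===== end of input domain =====

-- B replaces A's per-row gather (scan all headings, membership-test each) by a one-pass dedup of
-- the headings plus a heading-to-column index dict and a scatter of each row's own items into a
-- blank row: an alternative decomposition of the same task.


-- ===== PORT A =====
-- Each Python dict row arrives as an association list; PySem.Dict.ofList builds the dict it denotes.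
def convert_list_of_dicts_to_matrix (table : List (List (String × String))) : List (List String) :=
  let tableheadings : List String :=
    table.foldl (fun acc row =>
      (PySem.Dict.ofList row).keys.foldl
        (fun acc h => if h ∈ acc then acc else acc ++ [h]) acc) []
  table.foldl (fun newtable row =>
    let d := PySem.Dict.ofList row
    newtable ++ [tableheadings.foldl
      (fun newrow h => newrow ++ [if d.contains h then d.getD h "" else ""]) []])
    [tableheadings]

-- ===== PORT B =====
-- index[k] in Source B is a plain lookup that always hits (every row key is a heading), so getD 0 is exact there.
def convert_list_of_dicts_to_matrix_alt (table : List (List (String × String))) : List (List String) :=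
  let tableheadings : List String :=
    PySem.List.dedup (table.flatMap (fun row => (PySem.Dict.ofList row).keys))
  let index : PySem.Dict String Int :=
    PySem.Dict.ofList ((PySem.List.enumerate tableheadings).map (fun p => (p.2, p.1)))
  table.foldl (fun newtable row =>
    newtable ++ [(PySem.Dict.ofList row).items.foldl
      (fun newrow p => newrow.set (index.getD p.1 0).toNat p.2)
      (List.replicate tableheadings.length "")])
    [tableheadings]

-- ===== PRECONDITION & SPEC =====
def Spec_convert_list_of_dicts_to_matrix (table : List (List (String × String))) (out : List (List String)) : Prop := out = convert_list_of_dicts_to_matrix_alt table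
instance (table : List (List (String × String))) (out : List (List String)) : Decidable (Spec_convert_list_of_dicts_to_matrix table out) := by unfold Spec_convert_list_of_dicts_to_matrix; infer_instance

-- ===== CLAIM (what is proved, stated in full; the proofs are below) =====
def Claim_equal_convert_list_of_dicts_to_matrix : Prop := ∀ (table : List (List (String × String))), Dom_convert_list_of_dicts_to_matrix table → Spec_convert_list_of_dicts_to_matrix table (convert_list_of_dicts_to_matrix table)

-- ===== LEMMAS AND PROOFS =====

-- B's heading-to-column-index dict, abstracted over the heading list
def pvIdx (H : List String) : PySem.Dict String Int :=
  PySem.Dict.ofList ((PySem.List.enumerate H).map (fun p => (p.2, p.1)))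

-- A's accumulate-if-new loop over all rows is the ordered dedup of the concatenated key lists
theorem headings_eq (table : List (List (String × String))) :
    table.foldl (fun acc row =>
      (PySem.Dict.ofList row).keys.foldl
        (fun acc h => if h ∈ acc then acc else acc ++ [h]) acc) [] =
    PySem.List.dedup (table.flatMap (fun row => (PySem.Dict.ofList row).keys)) := by
  rw [PySem.List.dedup_eq_ofList]
  show _ = (table.flatMap (fun row => (PySem.Dict.ofList row).keys)).foldl PySem.Set.add PySem.Set.empty
  rw [List.foldl_flatMap]
  have : (fun (acc : List String) (h : String) => if h ∈ acc then acc else acc ++ [h])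
      = PySem.Set.add := by
    funext acc h
    simp [PySem.Set.add, PySem.Set.contains]
  rw [this]
  rfl

-- a fold of in-range writes, read back at j: the last write to j, else the initial cell
theorem foldl_set_getElem? {α : Type} (ps : List (Nat × α)) (arr : List α) (j : Nat)
    (hps : ∀ p ∈ ps, p.1 < arr.length) :
    (ps.foldl (fun a p => a.set p.1 p.2) arr)[j]? =
      ((ps.filter (fun p => p.1 == j)).getLast?.map (·.2)).or arr[j]? := by
  induction ps generalizing arr with
  | nil => simp
  | cons x ps ih =>
    rw [List.foldl_cons, ih (arr.set x.1 x.2) (by simpa using fun p hp => hps p (.tail _ hp))]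
    by_cases hx : x.1 = j
    · subst hx
      simp only [List.filter_cons, beq_self_eq_true, if_pos, List.getLast?_cons]
      rcases hlast : (ps.filter (fun p => p.1 == x.1)).getLast? with _ | y
      · simp [hlast, hps x (.head _)]
      · simp [hlast]
    · simp only [List.filter_cons, beq_iff_eq, hx, ite_false]
      rw [List.getElem?_set]
      simp [hx]

theorem enumerate_getElem {α : Type} (H : List α) (s : Int) (j : Nat) (hj : j < H.length) :
    ((s + j : Int), H[j]'hj) ∈ PySem.List.enumerate H s := by
  induction H generalizing s j with
  | nil => simp at hj
  | cons x xs ih =>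
    rw [PySem.List.enumerate_cons]
    cases j with
    | zero => simp
    | succ j =>
      right
      have := ih (s + 1) j (by simpa using hj)
      have harith : (s + 1 + (j:Int)) = s + ((j:Int) + 1) := by ring
      rw [harith] at this
      simpa using this

theorem idx_items (H : List String) (hnd : H.Nodup) :
    (pvIdx H).items = (PySem.List.enumerate H).map (fun p => (p.2, p.1)) := by
  unfold pvIdx PySem.Dict.ofList PySem.Dict.update
  have := PySem.Dict.items_foldl_insert_fresh
    ((PySem.List.enumerate H).map (fun p => (p.2, p.1))) Prod.fst Prod.snd PySem.Dict.empty
    (by intro a _; exact PySem.Dict.contains_empty _)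
    (by
      have : (((PySem.List.enumerate H).map (fun p => (p.2, p.1))).map Prod.fst) = H := by
        simp [List.map_map]
        exact PySem.List.map_snd_enumerate H 0
      rw [this]; exact hnd)
  simpa using this

theorem idx_getD (H : List String) (hnd : H.Nodup) (j : Nat) (hj : j < H.length) :
    (pvIdx H).getD (H[j]'hj) 0 = (j : Int) := by
  have hmem : (H[j]'hj, (j:Int)) ∈ (pvIdx H).items := by
    rw [idx_items H hnd]
    have := enumerate_getElem H 0 j hj
    have h2 : ((0:Int) + j) = (j:Int) := by ring
    rw [h2] at this
    exact List.mem_map.mpr ⟨_, this, rfl⟩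
  exact PySem.Dict.getD_of_mem_items _ hmem (PySem.Dict.nodup_keys_ofList _) 0

theorem idx_of_mem (H : List String) (hnd : H.Nodup) (k : String) (hk : k ∈ H) :
    ∃ t, ∃ (ht : t < H.length), H[t]'ht = k ∧ (pvIdx H).getD k 0 = (t : Int) := by
  obtain ⟨t, ht, rfl⟩ := List.getElem_of_mem hk
  exact ⟨t, ht, rfl, idx_getD H hnd t ht⟩

theorem filter_key_single {κ ν : Type} [BEq κ] [LawfulBEq κ] (l : List (κ × ν)) (k : κ) (v : ν)
    (hnd : (l.map Prod.fst).Nodup) (hmem : (k, v) ∈ l) :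
    l.filter (fun p => p.1 == k) = [(k, v)] := by
  induction l with
  | nil => simp at hmem
  | cons x rest ih =>
    simp only [List.map_cons, List.nodup_cons] at hnd
    rcases List.mem_cons.mp hmem with hx | hrest
    · subst hx
      simp only [List.filter_cons, beq_self_eq_true, if_pos]
      have : rest.filter (fun p => p.1 == k) = [] := by
        rw [List.filter_eq_nil_iff]
        intro p hp
        simp only [beq_iff_eq]
        intro hk
        exact hnd.1 (hk ▸ List.mem_map.mpr ⟨p, hp, rfl⟩)
      rw [this]
    · have hxk : x.1 ≠ k := by
        intro hk
        exact hnd.1 (hk ▸ List.mem_map.mpr ⟨(k,v), hrest, rfl⟩)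
      simp only [List.filter_cons, beq_iff_eq, hxk, ite_false]
      exact ih hnd.2 hrest

-- the heart: A's gather over the headings equals B's scatter of the row's items
theorem row_eq (H : List String) (hnd : H.Nodup) (d : PySem.Dict String String)
    (hknodup : d.keys.Nodup) (hk : ∀ k ∈ d.keys, k ∈ H) :
    H.foldl (fun newrow h => newrow ++ [if d.contains h then d.getD h "" else ""]) [] =
    d.items.foldl (fun newrow p => newrow.set ((pvIdx H).getD p.1 0).toNat p.2)
      (List.replicate H.length "") := by
  have hkeymem : ∀ p ∈ d.items, p.1 ∈ H := fun p hp =>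
    hk p.1 (List.mem_map.mpr ⟨p, hp, rfl⟩)
  rw [PySem.List.foldl_append_singleton_eq_map]
  simp only [List.nil_append]
  have hfold : d.items.foldl (fun newrow p => newrow.set ((pvIdx H).getD p.1 0).toNat p.2)
      (List.replicate H.length "") =
      (d.items.map (fun p => (((pvIdx H).getD p.1 0).toNat, p.2))).foldl
        (fun a q => a.set q.1 q.2) (List.replicate H.length "") := by
    rw [List.foldl_map]
  rw [hfold]
  have hps : ∀ q ∈ d.items.map (fun p => (((pvIdx H).getD p.1 0).toNat, p.2)),
      q.1 < (List.replicate H.length ("" : String)).length := by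
    intro q hq
    obtain ⟨p, hp, rfl⟩ := List.mem_map.mp hq
    obtain ⟨t, ht, _, hgd⟩ := idx_of_mem H hnd p.1 (hkeymem p hp)
    simp [hgd, ht]
  apply List.ext_getElem?
  intro i
  rw [foldl_set_getElem? _ _ _ hps]
  by_cases hi : i < H.length
  · have hfilter : (d.items.map (fun p => (((pvIdx H).getD p.1 0).toNat, p.2))).filter
        (fun q => q.1 == i) =
        (d.items.filter (fun p => p.1 == H[i]'hi)).map
          (fun p => (((pvIdx H).getD p.1 0).toNat, p.2)) := by
      rw [List.filter_map]
      congr 1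
      apply List.filter_congr
      intro p hp
      obtain ⟨t, ht, hHt, hgd⟩ := idx_of_mem H hnd p.1 (hkeymem p hp)
      simp only [Function.comp_apply, hgd, Int.toNat_natCast]
      rw [← hHt, Bool.eq_iff_iff]
      simp [hnd.getElem_inj_iff]
    rw [hfilter]
    by_cases hc : d.contains (H[i]'hi)
    · obtain ⟨p, hp, hp1⟩ := List.mem_map.mp ((PySem.Dict.contains_iff_mem_keys d _).mp hc)
      have hmem : (H[i]'hi, p.2) ∈ d.items := by
        rw [← hp1]; exact hp
      rw [filter_key_single d.items _ p.2 hknodup hmem]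
      obtain ⟨t, ht, hHt, hgd⟩ := idx_of_mem H hnd (H[i]'hi) (hkeymem _ hmem)
      have hti : t = i := hnd.getElem_inj_iff.mp hHt
      subst hti
      simp only [List.map_cons, List.map_nil, List.getLast?_singleton, hgd]
      simp [hi, hc, PySem.Dict.getD_of_mem_items d hmem hknodup]
    · have hnilf : d.items.filter (fun p => p.1 == H[i]'hi) = [] := by
        rw [List.filter_eq_nil_iff]
        intro p hp hpe
        apply hc
        rw [PySem.Dict.contains_iff_mem_keys]
        simp only [beq_iff_eq] at hpe
        exact hpe ▸ List.mem_map.mpr ⟨p, hp, rfl⟩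
      rw [hnilf]
      simp [hi, hc]
  · have hnilf : ((d.items.map (fun p => (((pvIdx H).getD p.1 0).toNat, p.2))).filter
        (fun q => q.1 == i)) = [] := by
      rw [List.filter_eq_nil_iff]
      intro q hq hqe
      simp only [beq_iff_eq] at hqe
      exact absurd (hqe ▸ hps q hq) (by simpa using hi)
    rw [hnilf]
    simp [hi]

-- ===== VERDICT (by name: the statement is the Claim_ definition above) =====
theorem convert_list_of_dicts_to_matrix_spec : Claim_equal_convert_list_of_dicts_to_matrix := by
  intro table _
  unfold Spec_convert_list_of_dicts_to_matrix
  unfold convert_list_of_dicts_to_matrix convert_list_of_dicts_to_matrix_alt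
  rw [headings_eq]
  set H := PySem.List.dedup (table.flatMap (fun row => (PySem.Dict.ofList row).keys)) with hHdef
  have hnd : H.Nodup := by
    rw [hHdef, PySem.List.dedup_eq_ofList]; exact PySem.Set.nodup_ofList _
  rw [PySem.List.foldl_append_singleton_eq_map, PySem.List.foldl_append_singleton_eq_map]
  congr 1
  apply List.map_congr_left
  intro row hrow
  exact row_eq H hnd (PySem.Dict.ofList row) (PySem.Dict.nodup_keys_ofList row)
    (fun k hkmem => by
      rw [hHdef, PySem.List.dedup_eq_ofList]
      exact (PySem.Set.mem_ofList _ _).mpr (List.mem_flatMap.mpr ⟨row, hrow, hkmem⟩))
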